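-- pv_equiv track=rewrite | github.com/coco-in-bluemoon/programmers-challenges | Level 5 연습문제/방의 개수/solution.py | solution
-- ===== SOURCE A (Python) =====
-- def solution(arrows):
--     delta_r = [-1, -1, 0, 1, 1, 1, 0, -1]
--     delta_c = [0, 1, 1, 1, 0, -1, -1, -1]
--
--     r, c = 0, 0
--     visited_position = set([(r, c)])
--     visited_direction = set()
--
--     counter = 0
--
--     for arrow in arrows:
--         dr = delta_r[arrow]
--         dc = delta_c[arrow]
--
--         for _ in range(2):
--             nr, nc = r+dr, c+dc
--             direction = (min((r, c), (nr, nc)), max((r, c), (nr, nc)))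
--
--             if (nr, nc) in visited_position:
--                 if direction not in visited_direction:
--                     counter += 1
--             visited_position.add((nr, nc))
--             visited_direction.add(direction)
--             r, c = nr, nc
--
--     return counter
-- ===== SOURCE B (Python) =====
-- def solution(arrows):
--     deltas = [(-1, 0), (-1, 1), (0, 1), (1, 1), (1, 0), (1, -1), (0, -1), (-1, -1)]
--     steps = [deltas[a] for a in arrows for _ in (0, 1)]
--     path = [(0, 0)]
--     for dr, dc in steps:
--         r, c = path[-1]
--         path.append((r + dr, c + dc))
--     edges = {(min(p, q), max(p, q)) for p, q in zip(path, path[1:])}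
--     return len(edges) - len(set(path)) + 1
-- ===== Notes on version B (the rewrite author's own statement) =====
-- stated objective: alternative
-- what changed: B replaces A's single stateful walk with an incremental revisited-vertex counter by three staged passes: expand arrows to half-step deltas, build the visited path list by a scan, then count distinct undirected edges and distinct vertices and return the Euler-characteristic cycle count |E| - |V| + 1 of the connected walked graph.
import Mathlib
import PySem

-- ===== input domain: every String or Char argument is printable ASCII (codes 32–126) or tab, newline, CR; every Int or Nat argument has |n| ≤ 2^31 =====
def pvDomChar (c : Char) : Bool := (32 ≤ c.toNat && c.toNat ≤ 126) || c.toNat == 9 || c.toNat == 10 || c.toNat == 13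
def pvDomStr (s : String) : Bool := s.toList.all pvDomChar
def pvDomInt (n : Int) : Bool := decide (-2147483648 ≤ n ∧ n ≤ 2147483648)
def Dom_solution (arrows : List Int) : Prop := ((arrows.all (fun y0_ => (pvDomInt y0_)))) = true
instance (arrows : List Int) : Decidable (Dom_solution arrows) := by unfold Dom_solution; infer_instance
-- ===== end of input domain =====

-- B replaces A's single stateful walk with an incremental counter by staged passes
-- (delta list, path scan, then |distinct edges| - |distinct vertices| + 1): alternative algorithm, same cost.

-- ===== PORT A =====
-- Python's min/max on int pairs is lexicographic
def pvPairMin (a b : Int × Int) : Int × Int :=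
  if a.1 < b.1 ∨ (a.1 = b.1 ∧ a.2 ≤ b.2) then a else b
def pvPairMax (a b : Int × Int) : Int × Int :=
  if a.1 < b.1 ∨ (a.1 = b.1 ∧ a.2 ≤ b.2) then b else a

def pvDeltaR : List Int := [-1, -1, 0, 1, 1, 1, 0, -1]
def pvDeltaC : List Int := [0, 1, 1, 1, 0, -1, -1, -1]

abbrev pvStateA : Type := Int × Int × PySem.Set (Int × Int) × PySem.Set ((Int × Int) × (Int × Int)) × Int

-- one half-step of A's inner `for _ in range(2)` body
def pvHalfA (dr dc : Int) (s : pvStateA) : pvStateA :=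
  match s with
  | (r, c, pos, dirs, counter) =>
    let nr := r + dr
    let nc := c + dc
    let direction := (pvPairMin (r, c) (nr, nc), pvPairMax (r, c) (nr, nc))
    let counter' :=
      if PySem.Set.contains pos (nr, nc) then
        (if PySem.Set.contains dirs direction then counter else counter + 1)
      else counter
    (nr, nc, PySem.Set.add pos (nr, nc), PySem.Set.add dirs direction, counter')

-- body of A's outer loop (delta lookup raises IndexError outside Pre_, where pyGet? is none)
def pvStepA (s : pvStateA) (arrow : Int) : pvStateA :=
  let dr := (PySem.List.pyGet? pvDeltaR arrow).getD 0
  let dc := (PySem.List.pyGet? pvDeltaC arrow).getD 0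
  (PySem.List.pyRange 0 2 1).foldl (fun t _ => pvHalfA dr dc t) s

def solution (arrows : List Int) : Int :=
  (arrows.foldl pvStepA
    ((0 : Int), (0 : Int), PySem.Set.ofList [((0 : Int), (0 : Int))],
      (PySem.Set.empty : PySem.Set ((Int × Int) × (Int × Int))), (0 : Int))).2.2.2.2

-- ===== PORT B =====
def pvDeltas : List (Int × Int) :=
  [(-1, 0), (-1, 1), (0, 1), (1, 1), (1, 0), (1, -1), (0, -1), (-1, -1)]

def pvNorm (p q : Int × Int) : (Int × Int) × (Int × Int) := (pvPairMin p q, pvPairMax p q)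

-- `steps = [deltas[a] for a in arrows for _ in (0, 1)]`
def pvSteps (arrows : List Int) : List (Int × Int) :=
  arrows.flatMap (fun a =>
    let d := (PySem.List.pyGet? pvDeltas a).getD (0, 0)
    [d, d])

-- path-building loop: append last + delta for each half-step delta
def pvPath : (Int × Int) → List (Int × Int) → List (Int × Int)
  | p, [] => [p]
  | p, d :: ds => p :: pvPath (p.1 + d.1, p.2 + d.2) ds

def solution_alt (arrows : List Int) : Int :=
  let path := pvPath (0, 0) (pvSteps arrows)
  let edges : PySem.Set ((Int × Int) × (Int × Int)) :=
    PySem.Set.ofList ((path.zip path.tail).map (fun pq => pvNorm pq.1 pq.2))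
  let verts : PySem.Set (Int × Int) := PySem.Set.ofList path
  ((edges.length : Int)) - ((verts.length : Int)) + 1

-- ===== PRECONDITION & SPEC =====
-- Pre_ excludes exactly the arrows on which Python A raises IndexError (delta_r[arrow] with arrow
-- outside -8..7; negative arrows down to -8 wrap Python-style and return normally).
def Pre_solution (arrows : List Int) : Prop := ∀ a ∈ arrows, -8 ≤ a ∧ a < 8
instance (arrows : List Int) : Decidable (Pre_solution arrows) := by unfold Pre_solution; infer_instance
def pvWitness_solution : List Int := [0, 2, 4, 6]

def Spec_solution (arrows : List Int) (out : Int) : Prop := out = solution_alt arrows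
instance (arrows : List Int) (out : Int) : Decidable (Spec_solution arrows out) := by unfold Spec_solution; infer_instance

-- ===== CLAIM =====
def Claim_equal_solution : Prop := ∀ (arrows : List Int), Dom_solution arrows → Pre_solution arrows → Spec_solution arrows (solution arrows)

-- ===== LEMMAS AND PROOFS =====

-- proof-only: fold a list of half-step deltas through A's half-step body
def pvHalf (s : pvStateA) (d : Int × Int) : pvStateA := pvHalfA d.1 d.2 s

-- proof-only: the normalized-edge list of the walk starting at p
def pvEdgesOf : (Int × Int) → List (Int × Int) → List ((Int × Int) × (Int × Int))
  | _, [] => []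
  | p, d :: ds =>
    let q := (p.1 + d.1, p.2 + d.2)
    pvNorm p q :: pvEdgesOf q ds

-- A-state invariant: counter = |edges| - |verts| + 1, edge endpoints visited, position visited
def pvInv (s : pvStateA) : Prop :=
  s.2.2.2.2 = ((s.2.2.2.1.length : Int)) - ((s.2.2.1.length : Int)) + 1 ∧
  (∀ e ∈ s.2.2.2.1, e.1 ∈ s.2.2.1 ∧ e.2 ∈ s.2.2.1) ∧
  (s.1, s.2.1) ∈ s.2.2.1

theorem pvPairMinMax (a b : Int × Int) :
    (pvPairMin a b = a ∧ pvPairMax a b = b) ∨ (pvPairMin a b = b ∧ pvPairMax a b = a) := by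
  unfold pvPairMin pvPairMax; split_ifs <;> simp

theorem pvHalfA_inv (dr dc : Int) (s : pvStateA) (h : pvInv s) : pvInv (pvHalfA dr dc s) := by
  obtain ⟨r, c, P, D, k⟩ := s
  obtain ⟨hk, hE, hr⟩ := h
  simp only [pvInv] at *
  unfold pvHalfA
  simp only []
  set nr := r + dr
  set nc := c + dc
  set dir := (pvPairMin (r, c) (nr, nc), pvPairMax (r, c) (nr, nc)) with hdir
  have hdcases : dir = ((r, c), (nr, nc)) ∨ dir = ((nr, nc), (r, c)) := by
    rcases pvPairMinMax (r, c) (nr, nc) with ⟨h1, h2⟩ | ⟨h1, h2⟩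
    · left; rw [hdir, h1, h2]
    · right; rw [hdir, h1, h2]
  by_cases hP : (nr, nc) ∈ P
  · have hPc : PySem.Set.contains P (nr, nc) = true := (PySem.Set.contains_iff _ _).mpr hP
    have hPadd : PySem.Set.add P (nr, nc) = P := by rw [PySem.Set.add, hPc]; simp
    by_cases hD : dir ∈ D
    · have hDc : PySem.Set.contains D dir = true := (PySem.Set.contains_iff _ _).mpr hD
      have hDadd : PySem.Set.add D dir = D := by rw [PySem.Set.add, hDc]; simp
      simp only [hPc, hDc, if_true, hPadd, hDadd]
      exact ⟨hk, hE, hP⟩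
    · have hDc : PySem.Set.contains D dir = false := by
        rw [Bool.eq_false_iff]; intro hcon; exact hD ((PySem.Set.contains_iff _ _).mp hcon)
      have hDadd : PySem.Set.add D dir = D ++ [dir] := by rw [PySem.Set.add, hDc]; simp
      simp only [hPc, hDc, if_true, if_false, Bool.false_eq_true, hPadd, hDadd]
      refine ⟨by simp [List.length_append]; omega, ?_, hP⟩
      intro e he
      rcases List.mem_append.mp he with he' | he'
      · exact hE e he'
      · have : e = dir := by simpa using he'
        subst this
        rcases hdcases with h' | h' <;> rw [h'] <;> exact ⟨by simp [hr, hP], by simp [hr, hP]⟩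
  · have hPc : PySem.Set.contains P (nr, nc) = false := by
      rw [Bool.eq_false_iff]; intro hcon; exact hP ((PySem.Set.contains_iff _ _).mp hcon)
    have hPadd : PySem.Set.add P (nr, nc) = P ++ [(nr, nc)] := by rw [PySem.Set.add, hPc]; simp
    have hD : dir ∉ D := by
      intro hcon
      rcases hdcases with h' | h'
      · exact hP (by have := (hE dir hcon).2; rw [h'] at this; simpa using this)
      · exact hP (by have := (hE dir hcon).1; rw [h'] at this; simpa using this)
    have hDc : PySem.Set.contains D dir = false := by
      rw [Bool.eq_false_iff]; intro hcon; exact hD ((PySem.Set.contains_iff _ _).mp hcon)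
    have hDadd : PySem.Set.add D dir = D ++ [dir] := by rw [PySem.Set.add, hDc]; simp
    simp only [hPc, hDc, Bool.false_eq_true, if_false, hPadd, hDadd]
    refine ⟨by simp [List.length_append]; omega, ?_, by simp⟩
    intro e he
    rcases List.mem_append.mp he with he' | he'
    · have := hE e he'
      exact ⟨List.mem_append.mpr (Or.inl this.1), List.mem_append.mpr (Or.inl this.2)⟩
    · have : e = dir := by simpa using he'
      subst this
      rcases hdcases with h' | h' <;> rw [h'] <;>
        exact ⟨by simp [hr], by simp [hr]⟩

theorem pvRangeTwo : PySem.List.pyRange 0 2 1 = [0, 1] := by decide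

-- B's pair-delta lookup agrees with A's two lookups inside Pre_
theorem pvDelta_pair (a : Int) (h1 : -8 ≤ a) (h2 : a < 8) :
    (PySem.List.pyGet? pvDeltas a).getD (0, 0) =
      ((PySem.List.pyGet? pvDeltaR a).getD 0, (PySem.List.pyGet? pvDeltaC a).getD 0) := by
  interval_cases a <;> decide

-- A's arrow loop, flattened to a fold over the half-step delta list
theorem pvFold_steps (arrows : List Int) (h : ∀ a ∈ arrows, -8 ≤ a ∧ a < 8) (s : pvStateA) :
    arrows.foldl pvStepA s = (pvSteps arrows).foldl pvHalf s := by
  induction arrows generalizing s with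
  | nil => rfl
  | cons a t ih =>
    have ha := h a (List.mem_cons_self)
    have hstep : pvStepA s a = pvHalf (pvHalf s ((PySem.List.pyGet? pvDeltas a).getD (0, 0)))
        ((PySem.List.pyGet? pvDeltas a).getD (0, 0)) := by
      unfold pvStepA pvHalf
      rw [pvRangeTwo, pvDelta_pair a ha.1 ha.2]
      rfl
    simp only [List.foldl, pvSteps, List.flatMap_cons, List.foldl_append] at *
    rw [hstep]
    exact ih (fun x hx => h x (List.mem_cons_of_mem _ hx)) _

-- invariant holds after folding any delta list
theorem pvFold_inv (ds : List (Int × Int)) (s : pvStateA) (h : pvInv s) :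
    pvInv (ds.foldl pvHalf s) := by
  induction ds generalizing s with
  | nil => exact h
  | cons d t ih => exact ih _ (pvHalfA_inv d.1 d.2 s h)

-- pvPath is nonempty with head p
theorem pvPath_cons (p : Int × Int) (ds : List (Int × Int)) :
    pvPath p ds = p :: (pvPath p ds).tail := by
  cases ds <;> rfl

-- the visited-position set of the fold is the fold of Set.add over the path tail
theorem pvFold_pos (ds : List (Int × Int)) (r c : Int)
    (P : PySem.Set (Int × Int)) (D : PySem.Set ((Int × Int) × (Int × Int))) (k : Int) :
    (ds.foldl pvHalf (r, c, P, D, k)).2.2.1 =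
      ((pvPath (r, c) ds).tail).foldl PySem.Set.add P := by
  induction ds generalizing r c P D k with
  | nil => rfl
  | cons d t ih =>
    simp only [List.foldl, pvPath]
    rw [ih]
    rw [pvPath_cons (r + d.1, c + d.2) t]
    rfl

-- the visited-direction set of the fold is the fold of Set.add over the edge list
theorem pvFold_dir (ds : List (Int × Int)) (r c : Int)
    (P : PySem.Set (Int × Int)) (D : PySem.Set ((Int × Int) × (Int × Int))) (k : Int) :
    (ds.foldl pvHalf (r, c, P, D, k)).2.2.2.1 =
      (pvEdgesOf (r, c) ds).foldl PySem.Set.add D := by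
  induction ds generalizing r c P D k with
  | nil => rfl
  | cons d t ih =>
    simp only [List.foldl, pvEdgesOf]
    rw [ih]
    rfl

-- B's zip-map edge list is pvEdgesOf
theorem pvZip_edges (ds : List (Int × Int)) (p : Int × Int) :
    (((pvPath p ds).zip (pvPath p ds).tail).map (fun pq => pvNorm pq.1 pq.2)) =
      pvEdgesOf p ds := by
  induction ds generalizing p with
  | nil => rfl
  | cons d t ih =>
    have hq := pvPath_cons (p.1 + d.1, p.2 + d.2) t
    simp only [pvPath, pvEdgesOf, List.tail_cons]
    rw [hq]
    simp only [List.zip_cons_cons, List.map_cons]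
    rw [← hq, ih]

-- ===== VERDICT =====
theorem solution_spec : Claim_equal_solution := by
  intro arrows _ hpre
  unfold Spec_solution solution solution_alt
  rw [pvFold_steps arrows hpre]
  have hinv : pvInv ((pvSteps arrows).foldl pvHalf
      ((0 : Int), (0 : Int), PySem.Set.ofList [((0 : Int), (0 : Int))],
        (PySem.Set.empty : PySem.Set ((Int × Int) × (Int × Int))), (0 : Int))) := by
    apply pvFold_inv
    refine ⟨by decide, ?_, by decide⟩
    intro e he; simp [PySem.Set.empty] at he
  obtain ⟨hk, -, -⟩ := hinv
  rw [hk, pvFold_pos, pvFold_dir]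
  have hpath := pvPath_cons ((0 : Int), (0 : Int)) (pvSteps arrows)
  have hverts : PySem.Set.ofList (pvPath ((0 : Int), (0 : Int)) (pvSteps arrows)) =
      ((pvPath ((0 : Int), (0 : Int)) (pvSteps arrows)).tail).foldl PySem.Set.add
        (PySem.Set.ofList [((0 : Int), (0 : Int))]) := by
    rw [PySem.Set.ofList_eq_foldl]
    conv_lhs => rw [hpath]
    rfl
  have hedges : PySem.Set.ofList
      (((pvPath ((0 : Int), (0 : Int)) (pvSteps arrows)).zip
        (pvPath ((0 : Int), (0 : Int)) (pvSteps arrows)).tail).map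
        (fun pq => pvNorm pq.1 pq.2)) =
      (pvEdgesOf ((0 : Int), (0 : Int)) (pvSteps arrows)).foldl PySem.Set.add
        (PySem.Set.empty : PySem.Set ((Int × Int) × (Int × Int))) := by
    rw [pvZip_edges, PySem.Set.ofList_eq_foldl]
    rfl
  simp only [hverts, hedges]
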